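-- pv_equiv track=rewrite | github.com/SabbirAhmad26/Trust_based_CBF | Carla_Sumo_Code/conflictCAVS.py | search_for_conflictCAVS
-- ===== SOURCE A (Python) =====
-- def search_for_conflictCAVS(table, egocar):
--     index = []
--     position = []
--
--     k = None
--     for i in range(len(table)):
--         if table[i][0] == egocar['id'][1]:
--             k = i
--             break
--
--     ip = -1
--     if k is not None:
--         for j in range(k - 1, 0, -1):
--             if table[j][29] == table[k][29]:
--                 ip = table[j][30]
--                 break
--
--         for i in range(4, len(egocar['id'])):
--             flag = 0
--             for j in range(k - 1, 0, -1):
--                 if table[j][egocar['id'][i] + 1] > 0: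
--                     index.append(table[j][30])
--                     position.append(table[j][egocar['id'][i] + 1])
--                     flag = 1
--                     break
--
--             if flag == 0:
--                 index.append(-1)
--                 position.append(-1)
--
--     return ip, index, position
-- ===== SOURCE B (Python) =====
-- def search_for_conflictCAVS(table, egocar):
--     if not table:
--         return -1, [], []
--     ids = egocar['id']
--     k = None
--     for i, row in enumerate(table):
--         if row[0] == ids[1]:
--             k = i
--             break
--     if k is None:
--         return -1, [], []
--     cols = [c + 1 for c in ids[4:]]
--     n = len(cols)
--     slots = [None] * n
--     ip = None
--     # single backward pass: resolve ip and every column slot in one sweep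
--     for j in range(k - 1, 0, -1):
--         if ip is None and table[j][29] == table[k][29]:
--             ip = table[j][30]
--         for s in range(n):
--             if slots[s] is None:
--                 v = table[j][cols[s]]
--                 if v > 0:
--                     slots[s] = (table[j][30], v)
--         if ip is not None and all(slots):
--             break
--     index = [s[0] if s else -1 for s in slots]
--     position = [s[1] if s else -1 for s in slots]
--     return (ip if ip is not None else -1), index, position
-- ===== Notes on version B (the rewrite author's own statement) =====
-- stated objective: alternative
-- what changed: A rescans rows k-1..1 once for ip and then once per conflict column; B makes a single backward pass that resolves ip and all column slots together, with an early exit once everything is filled.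
import Mathlib
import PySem

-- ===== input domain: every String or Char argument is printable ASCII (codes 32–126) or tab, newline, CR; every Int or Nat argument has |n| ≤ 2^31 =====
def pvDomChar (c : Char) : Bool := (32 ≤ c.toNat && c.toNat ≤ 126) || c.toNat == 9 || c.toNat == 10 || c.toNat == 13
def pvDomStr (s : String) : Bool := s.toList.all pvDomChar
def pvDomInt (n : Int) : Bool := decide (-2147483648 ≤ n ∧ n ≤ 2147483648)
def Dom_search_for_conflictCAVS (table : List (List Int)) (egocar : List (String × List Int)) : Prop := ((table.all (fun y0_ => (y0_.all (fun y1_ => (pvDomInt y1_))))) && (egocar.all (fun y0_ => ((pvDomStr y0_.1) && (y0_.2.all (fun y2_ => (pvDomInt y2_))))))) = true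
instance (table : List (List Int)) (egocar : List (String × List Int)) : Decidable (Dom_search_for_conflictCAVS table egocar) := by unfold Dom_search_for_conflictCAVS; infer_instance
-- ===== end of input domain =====

-- B replaces A's per-column backward rescans by ONE backward pass that fills all column
-- slots and the ip together, with an early exit (objective: alternative; same return value).

-- table[j][c] with Python index semantics (both Pythons index rows and cells the same way)
def pvCell (table : List (List Int)) (j c : Int) : Int :=
  PySem.List.pyGetD (PySem.List.pyGetD table j []) c 0

-- first i with table[i][0] == target (the identical k-search opening both Pythons)
def pvFindK (target : Int) (i : Int) : List (List Int) → Option Int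
  | [] => none
  | r :: rest => if PySem.List.pyGetD r 0 0 = target then some i else pvFindK target (i + 1) rest

-- ===== PORT A =====
-- A's first backward loop: ip = table[j][30] of the first j with table[j][29]==table[k][29], else -1
def pvIpA (table : List (List Int)) (k : Int) : List Int → Int
  | [] => -1
  | j :: rest =>
    if pvCell table j 29 = pvCell table k 29 then pvCell table j 30 else pvIpA table k rest

-- A's inner backward scan for one column c: first j with table[j][c] > 0
def pvColSearchA (table : List (List Int)) (c : Int) : List Int → Option (Int × Int)
  | [] => none
  | j :: rest =>
    if pvCell table j c > 0 then some (pvCell table j 30, pvCell table j c)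
    else pvColSearchA table c rest

-- A's outer loop over i in range(4, len(ids)): append hit or (-1,-1) per column
def pvColsA (table : List (List Int)) (ids : List Int) (js : List Int) : List Int → List Int × List Int
  | [] => ([], [])
  | i :: rest =>
    let c := PySem.List.pyGetD ids i 0 + 1
    let r := pvColsA table ids js rest
    match pvColSearchA table c js with
    | some p => (p.1 :: r.1, p.2 :: r.2)
    | none => (-1 :: r.1, -1 :: r.2)

def search_for_conflictCAVS (table : List (List Int)) (egocar : List (String × List Int)) : Int × List Int × List Int :=
  let ids := (PySem.Dict.mk egocar).getD "id" []
  match pvFindK (PySem.List.pyGetD ids 1 0) 0 table with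
  | none => (-1, [], [])
  | some k =>
    let js := PySem.List.pyRange (k - 1) 0 (-1)
    let ip := pvIpA table k js
    let ipos := pvColsA table ids js (PySem.List.pyRange 4 (ids.length : Int) 1)
    (ip, ipos.1, ipos.2)

-- ===== PORT B =====
-- B's single sweep step over the slot list: fill each still-empty slot whose cell is positive
def pvStepB (table : List (List Int)) (j : Int) (slots : List (Int × Option (Int × Int))) :
    List (Int × Option (Int × Int)) :=
  slots.map fun s =>
    match s.2 with
    | some _ => s
    | none => if pvCell table j s.1 > 0 then (s.1, some (pvCell table j 30, pvCell table j s.1)) else s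

-- B's single backward pass with early exit once ip and all slots are resolved
def pvLoopB (table : List (List Int)) (k : Int) :
    List Int → Option Int → List (Int × Option (Int × Int)) →
    Option Int × List (Int × Option (Int × Int))
  | [], ip, slots => (ip, slots)
  | j :: rest, ip, slots =>
    -- "if ip is None and table[j][29] == table[k][29]: ip = table[j][30]"
    let ip' := match ip with
               | none => if pvCell table j 29 = pvCell table k 29
                         then some (pvCell table j 30) else none
               | some v => some v
    let slots' := pvStepB table j slots
    if ip'.isSome ∧ slots'.all (fun s => s.2.isSome) then (ip', slots')
    else pvLoopB table k rest ip' slots'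

def search_for_conflictCAVS_alt (table : List (List Int)) (egocar : List (String × List Int)) : Int × List Int × List Int :=
  if table.isEmpty then (-1, [], [])   -- "if not table: return -1, [], []"
  else
    let ids := (PySem.Dict.mk egocar).getD "id" []
    match pvFindK (PySem.List.pyGetD ids 1 0) 0 table with
    | none => (-1, [], [])
    | some k =>
      let cols := (PySem.List.slice ids (some 4) none).map (· + 1)
      let slots0 : List (Int × Option (Int × Int)) := cols.map (fun c => (c, none))
      let r := pvLoopB table k (PySem.List.pyRange (k - 1) 0 (-1)) none slots0
      (r.1.getD (-1),
       r.2.map (fun s => match s.2 with | some p => p.1 | none => -1),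
       r.2.map (fun s => match s.2 with | some p => p.2 | none => -1))

-- ===== PRECONDITION & SPEC =====
-- egocar['id'] as the ports read it
def pvIds (egocar : List (String × List Int)) : List Int := (PySem.Dict.mk egocar).getD "id" []

-- index of the first row whose cell 0 equals the target (= table length if none matches)
def pvKidx (table : List (List Int)) (target : Int) : Nat :=
  table.findIdx (fun r => r.headD 0 == target)

-- length of row j (0 for an absent row)
def pvRowLen (table : List (List Int)) (j : Nat) : Nat := (table.getD j []).length

-- cell (j, c) with Python negative-index wrap, default 0 when absent
def pvCellN (table : List (List Int)) (j : Nat) (c : Int) : Int :=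
  PySem.List.pyGetD (table.getD j []) c 0

-- whether column index c is a valid Python index into row j
def pvValidC (table : List (List Int)) (j : Nat) (c : Int) : Bool :=
  decide (-(pvRowLen table j : Int) ≤ c ∧ c < (pvRowLen table j : Int))

-- the rows A's backward loops visit: [k-1, ..., 1]
def pvJsN (k : Nat) : List Nat := ((List.range k).drop 1).reverse

-- A's ip loop raises no IndexError: row k has a cell 29, and the first visited row that is
-- short or matches table[k][29] is a genuine match with at least 31 cells
def pvIpOkPre (table : List (List Int)) (k : Nat) : Bool :=
  (pvJsN k).isEmpty ||
  (decide (30 ≤ pvRowLen table k) &&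
   match (pvJsN k).find?
       (fun j => decide (pvRowLen table j < 30) || decide (pvCellN table j 29 = pvCellN table k 29)) with
   | none => true
   | some j => decide (31 ≤ pvRowLen table j))

-- A's scan for column c raises no IndexError: the first visited row where c is out of range
-- or the cell is positive is a genuine positive hit in a row with at least 31 cells
def pvColOkPre (table : List (List Int)) (k : Nat) (c : Int) : Bool :=
  (pvJsN k).isEmpty ||
  (match (pvJsN k).find? (fun j => !(pvValidC table j c) || decide (0 < pvCellN table j c)) with
   | none => true
   | some j => pvValidC table j c && decide (31 ≤ pvRowLen table j))

-- Pre_ holds exactly when the Python A returns normally; it excludes ONLY inputs on which A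
-- raises (missing 'id' key or ego id shorter than 2 with a nonempty table, an empty row at or
-- before the first matching row, and a backward scan that stops on a row too short for the
-- cell it reads); break-skipped short rows and long rows absorbing large indices stay inside.
def Pre_search_for_conflictCAVS (table : List (List Int)) (egocar : List (String × List Int)) : Prop :=
  table = [] ∨
  (((PySem.Dict.mk egocar).get? "id").isSome ∧ 2 ≤ (pvIds egocar).length ∧
   (∀ r ∈ table.take (pvKidx table (PySem.List.pyGetD (pvIds egocar) 1 0) + 1), r ≠ []) ∧
   (pvKidx table (PySem.List.pyGetD (pvIds egocar) 1 0) < table.length →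
     pvIpOkPre table (pvKidx table (PySem.List.pyGetD (pvIds egocar) 1 0)) = true ∧
     ∀ c ∈ ((pvIds egocar).drop 4).map (· + 1),
       pvColOkPre table (pvKidx table (PySem.List.pyGetD (pvIds egocar) 1 0)) c = true))
instance (table : List (List Int)) (egocar : List (String × List Int)) : Decidable (Pre_search_for_conflictCAVS table egocar) := by unfold Pre_search_for_conflictCAVS; infer_instance

def pvWitness_search_for_conflictCAVS : List (List Int) × (List (String × List Int)) :=
  ([[7, 0, 0, 0, 0, 0, 0, 0, 0, 0, 0, 0, 0, 0, 0, 0, 0, 0, 0, 0, 0, 0, 0, 0, 0, 0, 0, 0, 0, 1, 6, 0],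
    [5, 0, 0, 0, 0, 0, 3, 0, 0, 0, 0, 0, 0, 0, 0, 0, 0, 0, 0, 0, 0, 0, 0, 0, 0, 0, 0, 0, 0, 2, 4, 0],
    [9, 0, 0, 0, 0, 0, 0, 0, 0, 0, 0, 0, 0, 0, 0, 0, 0, 0, 0, 0, 0, 0, 0, 0, 0, 0, 0, 0, 0, 2, 8, 0]],
   [("id", [1, 9, 0, 0, 5])])

def Spec_search_for_conflictCAVS (table : List (List Int)) (egocar : List (String × List Int)) (out : Int × List Int × List Int) : Prop := out = search_for_conflictCAVS_alt table egocar
instance (table : List (List Int)) (egocar : List (String × List Int)) (out : Int × List Int × List Int) : Decidable (Spec_search_for_conflictCAVS table egocar out) := by unfold Spec_search_for_conflictCAVS; infer_instance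

-- ===== CLAIM (what is proved, stated in full; the proofs are below) =====
def Claim_equal_search_for_conflictCAVS : Prop := ∀ (table : List (List Int)) (egocar : List (String × List Int)), Dom_search_for_conflictCAVS table egocar → Pre_search_for_conflictCAVS table egocar → Spec_search_for_conflictCAVS table egocar (search_for_conflictCAVS table egocar)

-- ===== LEMMAS AND PROOFS =====

-- A's ip loop as an Option (first hit), to relate it to B's incremental ip
def pvIpOpt (table : List (List Int)) (k : Int) : List Int → Option Int
  | [] => none
  | j :: rest =>
    if pvCell table j 29 = pvCell table k 29 then some (pvCell table j 30)
    else pvIpOpt table k rest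

lemma pvIpA_eq_getD (table : List (List Int)) (k : Int) (js : List Int) :
    pvIpA table k js = (pvIpOpt table k js).getD (-1) := by
  induction js with
  | nil => rfl
  | cons j rest ih =>
    simp only [pvIpA, pvIpOpt]
    split_ifs <;> simp [ih]

-- B's sweep step leaves a resolved slot alone and resolves an empty slot exactly when
-- A's per-column search would hit row j first
lemma pvSlotEta (s : Int × Option (Int × Int)) (x : Option (Int × Int)) (h : s.2 = x) :
    s = (s.1, x) := by
  cases s; simp only at h; simp [h]

lemma pvStepB_break (table : List (List Int)) (j : Int) (js : List Int)
    (slots : List (Int × Option (Int × Int)))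
    (hall : ((pvStepB table j slots).all fun s => s.2.isSome) = true) :
    pvStepB table j slots =
      slots.map (fun s => (s.1, match s.2 with
                                | some p => some p
                                | none => pvColSearchA table s.1 (j :: js))) := by
  rw [pvStepB]
  apply List.map_congr_left
  intro s hs
  have hsome := List.all_eq_true.mp hall _ (List.mem_map_of_mem hs)
  cases h2 : s.2 with
  | some p => exact pvSlotEta _ _ (by simp [h2])
  | none =>
    simp only [h2] at hsome ⊢
    split_ifs at hsome ⊢ with hpos
    · simp [pvColSearchA, hpos]
    · simp [h2] at hsome

lemma pvStepB_cont (table : List (List Int)) (j : Int) (js : List Int)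
    (slots : List (Int × Option (Int × Int))) :
    (pvStepB table j slots).map (fun s => (s.1, match s.2 with
                                               | some p => some p
                                               | none => pvColSearchA table s.1 js)) =
      slots.map (fun s => (s.1, match s.2 with
                                | some p => some p
                                | none => pvColSearchA table s.1 (j :: js))) := by
  rw [pvStepB, List.map_map]
  apply List.map_congr_left
  intro s _
  cases h2 : s.2 with
  | some p => simp [Function.comp, h2]
  | none =>
    simp only [Function.comp, h2]
    split_ifs with hpos <;> simp [pvColSearchA, hpos, h2]

-- B's sweep computes, per slot, exactly A's per-column first hit, and A's first-hit ip
lemma pvLoopB_spec (table : List (List Int)) (k : Int) (js : List Int) :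
    ∀ (ip : Option Int) (slots : List (Int × Option (Int × Int))),
      pvLoopB table k js ip slots =
        ((match ip with | some v => some v | none => pvIpOpt table k js),
         slots.map (fun s => (s.1, match s.2 with
                                   | some p => some p
                                   | none => pvColSearchA table s.1 js))) := by
  induction js with
  | nil =>
    intro ip slots
    refine Prod.ext ?_ ?_
    · cases ip <;> rfl
    · show slots = _
      conv_lhs => rw [← List.map_id slots]
      apply List.map_congr_left
      intro s _
      cases h : s.2 with
      | some p => exact pvSlotEta _ _ (by simp [h])
      | none => exact pvSlotEta _ _ (by simp [h, pvColSearchA])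
  | cons j rest ih =>
    intro ip slots
    cases hipc : ip with
    | some v =>
      simp only [pvLoopB]
      split_ifs with hall
      · exact Prod.ext rfl (pvStepB_break table j rest slots hall.2)
      · rw [ih]
        exact Prod.ext rfl (pvStepB_cont table j rest slots)
    | none =>
      simp only [pvLoopB]
      split_ifs with hc hall habs
      · refine Prod.ext ?_ (pvStepB_break table j rest slots hall.2)
        simp [pvIpOpt, hc]
      · rw [ih]
        refine Prod.ext ?_ (pvStepB_cont table j rest slots)
        simp [pvIpOpt, hc]
      · exact absurd habs.1 (by simp)
      · rw [ih]
        refine Prod.ext ?_ (pvStepB_cont table j rest slots)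
        simp [pvIpOpt, hc]

-- A's column loop builds exactly the two per-column maps over the listed columns
lemma pvColsA_eq_maps (table : List (List Int)) (ids : List Int) (js : List Int) (is : List Int) :
    pvColsA table ids js is =
      ((is.map (fun i => PySem.List.pyGetD ids i 0 + 1)).map
         (fun c => match pvColSearchA table c js with | some p => p.1 | none => -1),
       (is.map (fun i => PySem.List.pyGetD ids i 0 + 1)).map
         (fun c => match pvColSearchA table c js with | some p => p.2 | none => -1)) := by
  induction is with
  | nil => rfl
  | cons i rest ih =>
    simp only [pvColsA, ih, List.map_cons]
    cases h : pvColSearchA table (PySem.List.pyGetD ids i 0 + 1) js with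
    | none => simp
    | some p => simp

-- range(4, len(ids)) indexed back into ids is ids[4:]
lemma map_pyGetD_pyRange_eq_drop (ids : List Int) (a : Nat) :
    (PySem.List.pyRange (a : Int) (ids.length : Int) 1).map
      (fun i => PySem.List.pyGetD ids i 0) = ids.drop a := by
  rw [PySem.List.pyRange_one]
  rw [List.map_map]
  apply List.ext_getElem
  · simp
  · intro n h1 h2
    simp only [List.getElem_map, List.getElem_range, Function.comp]
    have hn : a + n < ids.length := by
      simp at h1
      omega
    have : (a : Int) + (n : Int) = ((a + n : Nat) : Int) := by push_cast; ring
    rw [this, PySem.List.pyGetD_natCast, List.getD_eq_getElem _ _ hn, List.getElem_drop]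

-- ===== VERDICT (by name: the statement is the Claim_ definition above) =====
theorem search_for_conflictCAVS_spec : Claim_equal_search_for_conflictCAVS := by
  intro table egocar _ _
  show search_for_conflictCAVS table egocar = search_for_conflictCAVS_alt table egocar
  cases table with
  | nil => rfl
  | cons r rest =>
    unfold search_for_conflictCAVS search_for_conflictCAVS_alt
    simp only [List.isEmpty_cons, Bool.false_eq_true, if_false]
    cases hk : pvFindK (PySem.List.pyGetD ((PySem.Dict.mk egocar).getD "id" []) 1 0) 0 (r :: rest) with
    | none => simp only [hk]
    | some k =>
      simp only [pvLoopB_spec, List.map_map]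
      refine Prod.ext ?_ (Prod.ext ?_ ?_)
      · simp [pvIpA_eq_getD]
      all_goals rw [pvColsA_eq_maps]
      all_goals have hs : PySem.List.slice ((PySem.Dict.mk egocar).getD "id" []) (some 4) none
          = ((PySem.Dict.mk egocar).getD "id" []).drop 4 := by simp [pysem]
      all_goals rw [hs, ← map_pyGetD_pyRange_eq_drop ((PySem.Dict.mk egocar).getD "id" []) 4]
      all_goals simp [List.map_map, Function.comp]
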